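-- pv_equiv track=rewrite | github.com/Hergoln/PPKWU | exercise4/vcard/views.py | createVCard
-- ===== SOURCE A (Python) =====
-- def createVCard(data):
--     hymySring = ''
--     hymySring += data
--     for i in data.split(']['):
--         hymySring += i + "</b>"
--     vcardInString = ''
--
--     vcardInString += 'BEGIN:VCARD'
--     vcardInString += 'VERSION:4.0'
--     # here is code for generation
--
--
--
--     vcardInString += 'END:VCARD'
--     return hymySring
-- ===== SOURCE B (Python) =====
-- def createVCard(data):
--     # One library-level substitution instead of split + accumulate loop;
--     # the vCard scaffold in A is dead code and is dropped.
--     return data + data.replace('][', '</b>') + '</b>'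
-- ===== Notes on version B (the rewrite author's own statement) =====
-- stated objective: simpler
-- what changed: Replaces the split-into-pieces + accumulator loop (and drops the dead vCard scaffold) with a single str.replace of '][' by '</b>' plus a trailing '</b>'.
import Mathlib
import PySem

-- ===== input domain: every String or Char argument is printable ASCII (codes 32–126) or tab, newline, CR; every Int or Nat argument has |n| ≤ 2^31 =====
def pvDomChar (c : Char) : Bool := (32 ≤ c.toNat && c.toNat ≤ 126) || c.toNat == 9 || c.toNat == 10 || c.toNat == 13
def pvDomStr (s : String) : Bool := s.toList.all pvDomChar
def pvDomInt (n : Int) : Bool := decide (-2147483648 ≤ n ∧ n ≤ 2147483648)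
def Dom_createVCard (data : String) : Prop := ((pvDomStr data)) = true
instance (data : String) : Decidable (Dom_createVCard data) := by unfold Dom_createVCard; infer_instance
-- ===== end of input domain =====

-- B replaces A's split-into-pieces + accumulator loop (and drops A's dead vCard scaffold)
-- with one str.replace of '][' by '</b>' plus a trailing '</b>'; objective: simpler.

-- ===== PORT A =====
-- data.split('][') never raises (sep is the nonempty literal ']['), so getD [] is unreachable.
def createVCard (data : String) : String :=
  let hymySring : String := "" ++ data
  let hymySring :=
    ((PySem.Str.split? data "][").getD []).foldl (fun acc i => acc ++ i ++ "</b>") hymySring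
  let _vcardInString : String := (("" ++ "BEGIN:VCARD") ++ "VERSION:4.0") ++ "END:VCARD"
  hymySring

-- ===== PORT B =====
def createVCard_alt (data : String) : String :=
  data ++ PySem.Str.replace data "][" "</b>" ++ "</b>"

-- ===== PRECONDITION & SPEC =====
def Spec_createVCard (data : String) (out : String) : Prop := out = createVCard_alt data
instance (data : String) (out : String) : Decidable (Spec_createVCard data out) := by unfold Spec_createVCard; infer_instance

-- ===== CLAIM (what is proved, stated in full; the proofs are below) =====
def Claim_equal_createVCard : Prop := ∀ (data : String), Dom_createVCard data → Spec_createVCard data (createVCard data)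

-- ===== LEMMAS AND PROOFS =====

-- fuel-free form of ']['→suf substitution, the common value of both ports
def pvRep (suf : List Char) : List Char → List Char
  | [] => []
  | c :: t =>
    if ([']', '[']).isPrefixOf (c :: t) then suf ++ pvRep suf (t.drop 1)
    else c :: pvRep suf t
termination_by l => l.length
decreasing_by
  all_goals simp

theorem pvReplaceGo_eq (suf : List Char) :
    ∀ (fuel : Nat) (l acc : List Char), l.length ≤ fuel →
      PySem.Chars.replace.go ([']', '[']) suf fuel l acc = acc.reverse ++ pvRep suf l := by
  intro fuel
  induction fuel with
  | zero =>
    intro l acc h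
    have hl : l = [] := by cases l <;> simp_all
    subst hl
    simp [PySem.Chars.replace.go, pvRep]
  | succ n ih =>
    intro l acc h
    cases l with
    | nil => simp [PySem.Chars.replace.go, pvRep]
    | cons c t =>
      rw [PySem.Chars.replace.go]
      by_cases hp : ([']', '[']).isPrefixOf (c :: t) = true
      · rw [if_pos hp]
        have h2 : ([']', '['] : List Char).length = 2 := rfl
        rw [h2]
        have hlen : (List.drop 2 (c :: t)).length ≤ n := by
          simp at *; omega
        rw [ih _ _ hlen]
        rw [pvRep, if_pos hp]
        simp [List.drop]
      · rw [if_neg hp]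
        have hlen : t.length ≤ n := by simp at h; omega
        rw [ih _ _ hlen]
        rw [pvRep, if_neg hp]
        simp

theorem pvSplitGo_foldl (suf : List Char) :
    ∀ (fuel : Nat) (l cur : List Char) (acc : List (List Char)) (x : List Char),
      l.length ≤ fuel →
      List.foldl (fun a p => a ++ p ++ suf) x
          (PySem.Chars.splitOn.go ([']', '[']) fuel l cur acc)
        = List.foldl (fun a p => a ++ p ++ suf) x acc.reverse
            ++ cur.reverse ++ pvRep suf l ++ suf := by
  intro fuel
  induction fuel with
  | zero =>
    intro l cur acc x h
    have hl : l = [] := by cases l <;> simp_all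
    subst hl
    simp [PySem.Chars.splitOn.go, pvRep]
  | succ n ih =>
    intro l cur acc x h
    cases l with
    | nil => simp [PySem.Chars.splitOn.go, pvRep]
    | cons c t =>
      rw [PySem.Chars.splitOn.go]
      by_cases hp : ([']', '[']).isPrefixOf (c :: t) = true
      · rw [if_pos hp]
        have h2 : ([']', '['] : List Char).length = 2 := rfl
        rw [h2]
        have hlen : (List.drop 2 (c :: t)).length ≤ n := by
          simp at *; omega
        rw [ih _ _ _ _ hlen]
        rw [pvRep, if_pos hp]
        simp [List.drop, List.append_assoc]
      · rw [if_neg hp]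
        have hlen : t.length ≤ n := by simp at h; omega
        rw [ih _ _ _ _ hlen]
        rw [pvRep, if_neg hp]
        simp [List.append_assoc]

theorem pvFoldl_toList (ps : List (List Char)) :
    ∀ (s : String),
      ((ps.map String.ofList).foldl (fun a i => a ++ i ++ "</b>") s).toList
        = ps.foldl (fun a p => a ++ p ++ "</b>".toList) s.toList := by
  induction ps with
  | nil => intro s; simp
  | cons p rest ih =>
    intro s
    simp only [List.map_cons, List.foldl_cons, ih]
    congr 1
    simp

-- ===== VERDICT (by name: the statement is the Claim_ definition above) =====
theorem createVCard_spec : Claim_equal_createVCard := by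
  intro data _
  unfold Spec_createVCard createVCard createVCard_alt
  apply String.ext
  have hsep : ("][" : String).toList = [']', '['] := rfl
  rw [PySem.Str.split?]
  rw [hsep]
  rw [PySem.Chars.split?]
  simp only [List.isEmpty_cons, Bool.false_eq_true, if_false, Option.map_some,
    Option.getD_some]
  rw [pvFoldl_toList]
  rw [PySem.Chars.splitOn]
  rw [pvSplitGo_foldl _ _ _ _ _ _ (by omega)]
  simp only [List.reverse_nil, List.foldl_nil, String.toList_append]
  rw [PySem.Str.toList_replace, hsep, PySem.Chars.replace]
  simp only [List.isEmpty_cons, if_false]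
  rw [pvReplaceGo_eq _ _ _ _ (le_refl _)]
  simp
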